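-- pv_equiv track=rewrite | github.com/lenavandongen/cryptanalysis | master.py | frequency_order
-- ===== SOURCE A (Python) =====
-- def frequency_order(raw_text, repeats):
--     """ analyses the frequency of each letter, and puts them is a list in order
--     of size. You can let it only do a certain number of letters, but the program
--     tends to use all 26"""
--     text = raw_text.lower()
--     frequencies = [0 for _ in range(26)]
--     for i in text:
--         if i.isalpha():
--             frequencies[ord(i)-97] +=1
--     r_values = []
--     for _ in range(repeats):
--         r_values.append(chr(frequencies.index(max(frequencies)) + 97))
--         frequencies[frequencies.index(max(frequencies))] = -1
--     return(r_values)
-- ===== SOURCE B (Python) =====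
-- def frequency_order(raw_text, repeats):
--     """Rank the 26 letters by how often they occur in the text (most frequent
--     first, alphabetical among equal counts) and return the first `repeats`
--     of them as one-character strings."""
--     frequencies = [0] * 26
--     for ch in raw_text.lower():
--         if ch.isalpha():
--             frequencies[ord(ch) - 97] += 1
--     order = []
--     for v in sorted(set(frequencies), reverse=True):
--         for i in range(26):
--             if frequencies[i] == v:
--                 order.append(chr(i + 97))
--     return [order[j] for j in range(repeats)]
-- ===== Notes on version B (the rewrite author's own statement) =====
-- stated objective: alternative
-- what changed: A extracts letters by repeatedly scanning the 26-entry count array for its max, taking the first index and destroying it with -1 (four 26-entry scans per emitted letter); B computes the whole ranking once, non-destructively (distinct counts sorted descending, the letters of each count in alphabetical order) and reads the first `repeats` entries off it. Pre_ excludes repeats > 26: there, with all 26 counters already destroyed to -1, A pads the output with 'a' forever as an artefact of list.index on an all-(-1) array, while B's plain indexing of the 26-letter ranking raises IndexError.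
import Mathlib
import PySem

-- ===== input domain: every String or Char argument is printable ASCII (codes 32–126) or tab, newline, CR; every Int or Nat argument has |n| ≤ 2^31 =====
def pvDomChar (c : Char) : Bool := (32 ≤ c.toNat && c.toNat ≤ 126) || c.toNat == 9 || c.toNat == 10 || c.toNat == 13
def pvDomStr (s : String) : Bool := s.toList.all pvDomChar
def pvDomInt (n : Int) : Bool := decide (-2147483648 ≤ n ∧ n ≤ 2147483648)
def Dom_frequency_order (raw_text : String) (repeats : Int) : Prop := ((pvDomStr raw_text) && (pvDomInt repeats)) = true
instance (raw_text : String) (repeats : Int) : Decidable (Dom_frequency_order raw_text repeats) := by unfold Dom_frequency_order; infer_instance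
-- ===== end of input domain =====

-- B replaces A's destructive repeated max/index scans (four 26-entry scans per emitted letter)
-- by one non-destructive grouping pass (distinct counts sorted descending, letters of each count
-- in alphabetical order) read off once; proved to return the same list on Pre_ (repeats ≤ 26).

-- ===== PORT A =====
def frequency_order (raw_text : String) (repeats : Int) : List String :=
  let text := PySem.Str.lower raw_text
  let frequencies : List Int := (List.range 26).map (fun _ => 0)
  let frequencies := text.toList.foldl (fun f i =>
    if PySem.Chars.isalpha i then f.set (i.toNat - 97) (f.getD (i.toNat - 97) 0 + 1) else f) frequencies
  let st := (PySem.List.pyRange 0 repeats 1).foldl (fun (s : List String × List Int) _ =>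
    let r_values := s.1
    let frequencies := s.2
    let r_values := r_values ++ [String.mk [Char.ofNat (((PySem.List.index? frequencies ((PySem.List.max? frequencies (fun x => x)).getD 0)).getD 0) + 97)]]
    let frequencies := frequencies.set ((PySem.List.index? frequencies ((PySem.List.max? frequencies (fun x => x)).getD 0)).getD 0) (-1)
    (r_values, frequencies)) ([], frequencies)
  st.1

-- ===== PORT B =====
def frequency_order_alt (raw_text : String) (repeats : Int) : List String :=
  let frequencies : List Int := List.replicate 26 0
  let frequencies := (PySem.Str.lower raw_text).toList.foldl (fun f ch =>
    if PySem.Chars.isalpha ch then f.set (ch.toNat - 97) (f.getD (ch.toNat - 97) 0 + 1) else f) frequencies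
  let order : List String := (PySem.List.sorted (PySem.Set.ofList frequencies) (fun x => x) true).foldl
    (fun acc v => (PySem.List.pyRange 0 26 1).foldl
      (fun acc i => if PySem.List.pyGetD frequencies i 0 = v then acc ++ [String.mk [Char.ofNat (i.toNat + 97)]] else acc) acc) []
  -- order[j]: Python raises IndexError past the end; Pre_ keeps j < 26, so the .getD "" default is never taken
  (PySem.List.pyRange 0 repeats 1).map (fun j => (PySem.List.pyGet? order j).getD "")

-- ===== PRECONDITION & SPEC =====
-- Pre_ excludes repeats > 26 (A still returns there: with all 26 counters destroyed to -1 it pads the output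
-- with 'a' forever, an artefact of list.index on an all-(-1) array; B's indexing of the 26-letter ranking raises IndexError there).
def Pre_frequency_order (raw_text : String) (repeats : Int) : Prop := repeats ≤ 26
instance (raw_text : String) (repeats : Int) : Decidable (Pre_frequency_order raw_text repeats) := by unfold Pre_frequency_order; infer_instance
def pvWitness_frequency_order : String × Int := ("hello world", 5)

def Spec_frequency_order (raw_text : String) (repeats : Int) (out : List String) : Prop := out = frequency_order_alt raw_text repeats
instance (raw_text : String) (repeats : Int) (out : List String) : Decidable (Spec_frequency_order raw_text repeats out) := by unfold Spec_frequency_order; infer_instance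

-- ===== CLAIM (what is proved, stated in full; the proofs are below) =====
def Claim_equal_frequency_order : Prop := ∀ (raw_text : String) (repeats : Int), Dom_frequency_order raw_text repeats → Pre_frequency_order raw_text repeats → Spec_frequency_order raw_text repeats (frequency_order raw_text repeats)

-- ===== LEMMAS AND PROOFS =====

-- the one-letter string for letter index i
def chrS (i : Nat) : String := String.mk [Char.ofNat (i + 97)]

-- the letter-counting fold both ports perform
def countsOf (text : List Char) : List Int :=
  text.foldl (fun f ch =>
    if PySem.Chars.isalpha ch then f.set (ch.toNat - 97) (f.getD (ch.toNat - 97) 0 + 1) else f)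
    (List.replicate 26 0)

-- one iteration of A's extraction loop
def stepA (s : List String × List Int) : List String × List Int :=
  (s.1 ++ [String.mk [Char.ofNat (((PySem.List.index? s.2 ((PySem.List.max? s.2 (fun x => x)).getD 0)).getD 0) + 97)]],
   s.2.set ((PySem.List.index? s.2 ((PySem.List.max? s.2 (fun x => x)).getD 0)).getD 0) (-1))

-- B's ranking: distinct counts descending, and for each count its letter indices ascending
def valsOf (f : List Int) : List Int := PySem.List.sorted (PySem.Set.ofList f) (fun x => x) true
def bucket (f : List Int) (v : Int) : List Nat := (List.range 26).filter (fun i => f.getD i 0 = v)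
def idxOrd (f : List Int) : List Nat := (valsOf f).flatMap (bucket f)

-- f with the positions listed in `done` overwritten by -1
def mask (f : List Int) (done : List Nat) : List Int := done.foldl (fun g i => g.set i (-1)) f

-- the strict "A extracts a before b" order: larger count first, index tie-break
def rel (f : List Int) (a b : Nat) : Prop := f.getD b 0 < f.getD a 0 ∨ (f.getD a 0 = f.getD b 0 ∧ a < b)

theorem counts_aux (t : List Char) (f : List Int) :
    (t.foldl (fun f ch => if PySem.Chars.isalpha ch then f.set (ch.toNat - 97) (f.getD (ch.toNat - 97) 0 + 1) else f) f).length = f.length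
    ∧ ((∀ x ∈ f, 0 ≤ x) → ∀ x ∈ t.foldl (fun f ch => if PySem.Chars.isalpha ch then f.set (ch.toNat - 97) (f.getD (ch.toNat - 97) 0 + 1) else f) f, 0 ≤ x) := by
  induction t generalizing f with
  | nil => exact ⟨rfl, fun h => h⟩
  | cons c t ih =>
    simp only [List.foldl_cons]
    constructor
    · split
      · exact ((ih _).1).trans (by simp)
      · exact (ih _).1
    · intro hf
      split
      · refine (ih _).2 ?_
        intro x hx
        rcases List.mem_or_eq_of_mem_set hx with h | h
        · exact hf x h
        · subst h
          have : 0 ≤ f.getD (c.toNat - 97) 0 := by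
            rcases Nat.lt_or_ge (c.toNat - 97) f.length with hlt | hge
            · rw [List.getD_eq_getElem _ _ hlt]; exact hf _ (List.getElem_mem hlt)
            · rw [List.getD_eq_default _ _ hge]
          omega
      · exact (ih _).2 hf

theorem counts_len (t : List Char) : (countsOf t).length = 26 := by
  simpa using (counts_aux t (List.replicate 26 0)).1

theorem counts_nonneg (t : List Char) : ∀ x ∈ countsOf t, 0 ≤ x := by
  refine (counts_aux t (List.replicate 26 0)).2 ?_
  intro x hx; simp at hx; omega

theorem mask_len (f : List Int) (done : List Nat) : (mask f done).length = f.length := by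
  induction done generalizing f with
  | nil => rfl
  | cons d rest ih => simpa [mask, List.foldl_cons] using (ih (f.set d (-1))).trans (by simp)

theorem mask_getD (f : List Int) (done : List Nat) (hd : ∀ x ∈ done, x < f.length) (i : Nat) :
    (mask f done).getD i 0 = if i ∈ done then -1 else f.getD i 0 := by
  induction done generalizing f with
  | nil => simp [mask]
  | cons d rest ih =>
    have hrest : ∀ x ∈ rest, x < (f.set d (-1)).length := by
      intro x hx; simpa using hd x (List.mem_cons_of_mem _ hx)
    have := ih (f.set d (-1)) hrest
    simp only [mask, List.foldl_cons] at this ⊢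
    rw [this]
    by_cases hir : i ∈ rest
    · simp [hir]
    · by_cases hid : i = d
      · subst hid
        simp only [hir, if_false, if_pos (List.mem_cons_self)]
        rw [List.getD_eq_getElem _ _ (by simpa using hd i (by simp))]
        simp [List.getElem_set_self (by simpa using hd i (by simp))]
      · have : i ∈ d :: rest ↔ False := by simp [hid, hir]
        simp [hir, hid, this, List.getD]
        rw [List.getElem?_set_ne (by omega)]

theorem mem_bucket (f : List Int) (v : Int) (i : Nat) :
    i ∈ bucket f v ↔ i < 26 ∧ f.getD i 0 = v := by
  simp [bucket, List.mem_filter]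

theorem vals_nodup (f : List Int) : (valsOf f).Nodup := by
  exact ((PySem.List.sorted_perm _ _ _).nodup_iff).mpr (PySem.Set.nodup_ofList f)

theorem mem_vals (f : List Int) (v : Int) : v ∈ valsOf f ↔ v ∈ f := by
  rw [valsOf, PySem.List.mem_sorted, PySem.Set.mem_ofList]

theorem idxOrd_perm (f : List Int) (hl : f.length = 26) : (idxOrd f).Perm (List.range 26) := by
  have hnd : (idxOrd f).Nodup := by
    rw [idxOrd, List.nodup_flatMap]
    refine ⟨fun v _ => List.filter_sublist.nodup (List.nodup_range), ?_⟩
    refine (vals_nodup f).imp_of_mem ?_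
    intro v w _ _ hne
    intro s hs hsw
    have h1 := (mem_bucket f v s).1 hs
    have h2 := (mem_bucket f w s).1 hsw
    exact absurd (h1.2 ▸ h2.2) hne
  refine (List.perm_ext_iff_of_nodup hnd (List.nodup_range)).mpr ?_
  intro i
  rw [idxOrd, List.mem_flatMap, List.mem_range]
  constructor
  · rintro ⟨v, _, hb⟩; exact ((mem_bucket f v i).1 hb).1
  · intro hi
    refine ⟨f.getD i 0, ?_, (mem_bucket f _ i).2 ⟨hi, rfl⟩⟩
    rw [mem_vals]
    rw [List.getD_eq_getElem _ _ (by omega)]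
    exact List.getElem_mem _

theorem idxOrd_pairwise (f : List Int) : (idxOrd f).Pairwise (rel f) := by
  rw [idxOrd, List.pairwise_flatMap]
  constructor
  · intro v _
    have h1 : (bucket f v).Pairwise (· < ·) := List.pairwise_lt_range.sublist List.filter_sublist
    refine h1.imp_of_mem ?_
    intro a b ha hb hab
    right
    exact ⟨by rw [((mem_bucket f v a).1 ha).2, ((mem_bucket f v b).1 hb).2], hab⟩
  · have h1 : (valsOf f).Pairwise (fun a b => b ≤ a) := PySem.List.sorted_pairwise_rev _ _
    have h2 := h1.and (vals_nodup f)
    refine h2.imp ?_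
    rintro v w ⟨hle, hne⟩ x hx y hy
    left
    rw [((mem_bucket f v x).1 hx).2, ((mem_bucket f w y).1 hy).2]
    omega

theorem B_order (f : List Int) :
    (valsOf f).foldl
      (fun acc v => (PySem.List.pyRange 0 26 1).foldl
        (fun acc i => if PySem.List.pyGetD f i 0 = v then acc ++ [String.mk [Char.ofNat (i.toNat + 97)]] else acc) acc) []
      = (idxOrd f).map chrS := by
  have h26 : PySem.List.pyRange 0 26 1 = (List.range 26).map (fun k => (k : Int)) := by
    simpa using PySem.List.pyRange_zero_nat 26
  have hinner : ∀ (v : Int) (acc : List String),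
      (PySem.List.pyRange 0 26 1).foldl
        (fun acc i => if PySem.List.pyGetD f i 0 = v then acc ++ [String.mk [Char.ofNat (i.toNat + 97)]] else acc) acc
      = acc ++ (bucket f v).map chrS := by
    intro v acc
    rw [h26, List.foldl_map]
    show (List.range 26).foldl (fun (x : List String) (y : ℕ) => if PySem.List.pyGetD f (↑y) 0 = v then x ++ [String.mk [Char.ofNat ((Int.toNat ↑y) + 97)]] else x) acc = _
    simp only [PySem.List.pyGetD_natCast, Int.toNat_natCast]
    simpa [chrS, bucket] using
      PySem.List.foldl_append_ite (fun k => f.getD k 0 = v) chrS (List.range 26) acc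
  have main : ∀ (vs : List Int) (acc : List String),
      vs.foldl
        (fun acc v => (PySem.List.pyRange 0 26 1).foldl
          (fun acc i => if PySem.List.pyGetD f i 0 = v then acc ++ [String.mk [Char.ofNat (i.toNat + 97)]] else acc) acc) acc
      = acc ++ vs.flatMap (fun v => (bucket f v).map chrS) := by
    intro vs
    induction vs with
    | nil => intro acc; simp
    | cons v vs ih =>
      intro acc
      rw [List.foldl_cons, hinner v acc, ih]
      simp
  rw [main (valsOf f) [], idxOrd, List.map_flatMap]
  simp

theorem foldl_stepA (l : List Int) (init : List String × List Int) :
    l.foldl (fun s (_ : Int) => stepA s) init = stepA^[l.length] init :=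
  List.foldl_const stepA init l

theorem step_at (f : List Int) (hl : f.length = 26) (hnn : ∀ x ∈ f, 0 ≤ x)
    (done rest : List Nat) (j : Nat) (hd : idxOrd f = done ++ j :: rest) (out : List String) :
    stepA (out, mask f done) = (out ++ [chrS j], mask f (done ++ [j])) := by
  have hperm := idxOrd_perm f hl
  have hmem : ∀ i : Nat, i ∈ idxOrd f ↔ i < 26 := by
    intro i; rw [hperm.mem_iff, List.mem_range]
  have hnd : (idxOrd f).Nodup := hperm.nodup_iff.mpr List.nodup_range
  have hj26 : j < 26 := (hmem j).1 (by rw [hd]; simp)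
  have hjdone : j ∉ done := by
    rw [hd] at hnd
    intro hmem'
    exact (List.disjoint_of_nodup_append hnd) hmem' (by simp)
  have hdone26 : ∀ x ∈ done, x < f.length := by
    intro x hx; rw [hl]
    exact (hmem x).1 (by rw [hd]; exact List.mem_append_left _ hx)
  have hmlen : (mask f done).length = 26 := by rw [mask_len, hl]
  have hmgetD := mask_getD f done hdone26
  have hrest : ∀ i ∈ rest, rel f j i := by
    have hp := idxOrd_pairwise f
    rw [hd] at hp
    exact (List.pairwise_cons.mp (List.pairwise_append.mp hp).2.1).1
  have hVnn : 0 ≤ f.getD j 0 := by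
    rw [List.getD_eq_getElem _ _ (by omega)]
    exact hnn _ (List.getElem_mem _)
  -- every entry of the masked list is at most f.getD j 0
  have hub : ∀ y ∈ mask f done, y ≤ f.getD j 0 := by
    intro y hy
    obtain ⟨i, hi, rfl⟩ := List.getElem_of_mem hy
    have hi26 : i < 26 := by omega
    have : (mask f done)[i] = (mask f done).getD i 0 := (List.getD_eq_getElem _ _ hi).symm
    rw [this, hmgetD i]
    by_cases hdi : i ∈ done
    · rw [if_pos hdi]; omega
    · simp only [hdi, if_false]
      have : i ∈ idxOrd f := (hmem i).2 hi26
      rw [hd] at this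
      rcases List.mem_append.mp this with h | h
      · exact absurd h hdi
      · rcases List.mem_cons.mp h with h | h
        · subst h; exact le_refl _
        · rcases hrest i h with h' | h'
          · omega
          · omega
  have hmj : (mask f done).getD j 0 = f.getD j 0 := by rw [hmgetD j]; simp [hjdone]
  have hVm : f.getD j 0 ∈ mask f done := by
    rw [← hmj, List.getD_eq_getElem _ _ (by omega)]
    exact List.getElem_mem _
  -- the max of the masked list is f.getD j 0
  have hmax : (PySem.List.max? (mask f done) (fun x => x)).getD 0 = f.getD j 0 := by
    rcases h : PySem.List.max? (mask f done) (fun x => x) with _ | M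
    · rw [PySem.List.max?_eq_none_iff] at h
      rw [h] at hmlen; simp at hmlen
    · have h1 : M ∈ mask f done := PySem.List.max?_mem h
      have h2 := PySem.List.max?_isMax h
      have h3 : M ≤ f.getD j 0 := hub M h1
      have h4 : f.getD j 0 ≤ M := h2 _ hVm
      simp only [Option.getD_some]; omega
  -- its first index is j
  have hidx : PySem.List.index? (mask f done) (f.getD j 0) = some j := by
    rw [PySem.List.index?_eq_some_iff]
    refine ⟨(mask f done).take j, (mask f done).drop (j + 1), ?_, ?_, ?_⟩
    · conv_lhs => rw [← List.take_append_drop j (mask f done)]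
      rw [List.drop_eq_getElem_cons (by omega)]
      congr 2
      rw [← List.getD_eq_getElem _ 0 (by omega), hmgetD j]
      simp [hjdone]
    · rw [List.length_take]; omega
    · intro hVin
      obtain ⟨p, hp, hpeq⟩ := List.getElem_of_mem hVin
      rw [List.length_take] at hp
      have hpj : p < j := by omega
      have hp26 : p < 26 := by omega
      rw [List.getElem_take] at hpeq
      have hpget : (mask f done).getD p 0 = f.getD j 0 := by
        rw [List.getD_eq_getElem _ _ (by omega)]; exact hpeq
      rw [hmgetD p] at hpget
      by_cases hpd : p ∈ done
      · rw [if_pos hpd] at hpget; omega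
      · rw [if_neg hpd] at hpget
        have : p ∈ idxOrd f := (hmem p).2 hp26
        rw [hd] at this
        rcases List.mem_append.mp this with h | h
        · exact hpd h
        · rcases List.mem_cons.mp h with h | h
          · omega
          · rcases hrest p h with h' | h' <;> omega
  -- assemble
  simp only [stepA, hmax, hidx, Option.getD_some, Prod.mk.injEq]
  refine ⟨by simp [chrS], ?_⟩
  show (mask f done).set j (-1) = mask f (done ++ [j])
  simp [mask, List.foldl_append]

theorem step_consume (f : List Int) (hl : f.length = 26) (hnn : ∀ x ∈ f, 0 ≤ x) :
    ∀ (rest done tail : List Nat) (out : List String), idxOrd f = done ++ rest ++ tail →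
    stepA^[rest.length] (out, mask f done) = (out ++ rest.map chrS, mask f (done ++ rest)) := by
  intro rest
  induction rest with
  | nil => intro done tail out _; simp
  | cons j rest ih =>
    intro done tail out hdec
    rw [List.length_cons, Function.iterate_succ_apply]
    rw [step_at f hl hnn done (rest ++ tail) j (by simpa using hdec) out]
    rw [ih (done ++ [j]) tail (out ++ [chrS j]) (by simpa using hdec)]
    simp

theorem A_closed (f : List Int) (hl : f.length = 26) (hnn : ∀ x ∈ f, 0 ≤ x) (n : Nat) (hn : n ≤ 26) :
    (stepA^[n] ([], f)).1 = (List.take n (idxOrd f)).map chrS := by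
  have hlen26 : (idxOrd f).length = 26 := by
    rw [(idxOrd_perm f hl).length_eq, List.length_range]
  have hmask0 : mask f [] = f := rfl
  have hdec : idxOrd f = [] ++ List.take n (idxOrd f) ++ List.drop n (idxOrd f) := by simp
  have := step_consume f hl hnn (List.take n (idxOrd f)) [] (List.drop n (idxOrd f)) [] hdec
  rw [hmask0] at this
  rw [List.length_take, hlen26] at this
  rw [min_eq_left hn] at this
  rw [this]
  simp

theorem out_eq (f : List Int) (hl : f.length = 26) (n : Nat) (hn : n ≤ 26) :
    (List.take n (idxOrd f)).map chrS
      = (List.range n).map (fun (j : Nat) => (PySem.List.pyGet? ((idxOrd f).map chrS) (j : Int)).getD "") := by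
  have hlen26 : (idxOrd f).length = 26 := by
    rw [(idxOrd_perm f hl).length_eq, List.length_range]
  apply List.ext_getElem (by simp [hlen26]; omega)
  intro k h1 h2
  have hk : k < n := by simpa using h2
  simp only [List.getElem_map, List.getElem_range]
  rw [PySem.List.pyGet?_natCast, List.getElem?_eq_getElem (by simp [hlen26]; omega)]
  rw [Option.getD_some]
  rw [List.getElem_map, List.getElem_take]

-- ===== VERDICT (by name: the statement is the Claim_ definition above) =====
theorem frequency_order_spec : Claim_equal_frequency_order := by
  intro raw repeats _ hpre
  unfold Spec_frequency_order
  have hA : frequency_order raw repeats =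
      ((PySem.List.pyRange 0 repeats 1).foldl (fun s (_ : Int) => stepA s)
        ([], countsOf (PySem.Str.lower raw).toList)).1 := rfl
  have hB : frequency_order_alt raw repeats =
      (PySem.List.pyRange 0 repeats 1).map (fun j => (PySem.List.pyGet?
          ((valsOf (countsOf (PySem.Str.lower raw).toList)).foldl
            (fun acc v => (PySem.List.pyRange 0 26 1).foldl
              (fun acc i => if PySem.List.pyGetD (countsOf (PySem.Str.lower raw).toList) i 0 = v then acc ++ [String.mk [Char.ofNat (i.toNat + 97)]] else acc) acc) [])
          j).getD "") := rfl
  have hlenr : (PySem.List.pyRange 0 repeats 1).length = repeats.toNat := by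
    simpa using PySem.List.length_pyRange_one 0 repeats
  have hn : repeats.toNat ≤ 26 := by
    unfold Pre_frequency_order at hpre; omega
  rw [hA, foldl_stepA, hlenr,
      A_closed _ (counts_len _) (counts_nonneg _) repeats.toNat hn,
      out_eq _ (counts_len _) repeats.toNat hn, hB, B_order]
  rw [PySem.List.pyRange_one 0 repeats, List.map_map]
  simp
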